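-- pv_equiv track=rewrite | github.com/GFG-GLAU/Algorithms-must-learn-in-2022 | String/Longest Common Anangram/LongestCommonAnagram.py | longCommonAnagramSubseq
-- ===== SOURCE A (Python) =====
-- SIZE = 26
--
-- def longCommonAnagramSubseq(str1, str2,
-- 								n1, n2):
--
-- 	# List for storing frequencies
-- 	# of each character
-- 	freq1 = [0] * SIZE
-- 	freq2 = [0] * SIZE
--
-- 	l = 0
--
-- 	# calculate frequency of each
-- 	# character of 'str1[]'
-- 	for i in range(n1):
-- 		freq1[ord(str1[i]) -
-- 			ord('a')] += 1
--
-- 	# calculate frequency of each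
-- 	# character of 'str2[]'
-- 	for i in range(n2) :
-- 		freq2[ord(str2[i]) -
-- 			ord('a')] += 1
--
-- 	# for each character add its
-- 	# minimum frequency out of
-- 	# the two strings in 'len'
-- 	for i in range(SIZE):
-- 		l += min(freq1[i], freq2[i])
--
-- 	# required length
-- 	return l
-- ===== SOURCE B (Python) =====
-- def longCommonAnagramSubseq(str1, str2, n1, n2):
--     # count characters of str1's prefix once
--     freq1 = [0] * 26
--     for i in range(n1):
--         freq1[ord(str1[i]) - ord('a')] += 1
--     # greedily match str2's characters against the remaining budget
--     l = 0
--     for j in range(n2):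
--         idx = ord(str2[j]) - ord('a')
--         if freq1[idx] > 0:
--             freq1[idx] -= 1
--             l += 1
--     return l
-- ===== Notes on version B (the rewrite author's own statement) =====
-- stated objective: alternative
-- what changed: B drops the second frequency array and the 26-slot minimum-summing loop: it counts only str1's prefix, then makes a single greedy pass over str2's prefix decrementing the remaining budget, which reproduces sum(min(freq1,freq2)).
import Mathlib
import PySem

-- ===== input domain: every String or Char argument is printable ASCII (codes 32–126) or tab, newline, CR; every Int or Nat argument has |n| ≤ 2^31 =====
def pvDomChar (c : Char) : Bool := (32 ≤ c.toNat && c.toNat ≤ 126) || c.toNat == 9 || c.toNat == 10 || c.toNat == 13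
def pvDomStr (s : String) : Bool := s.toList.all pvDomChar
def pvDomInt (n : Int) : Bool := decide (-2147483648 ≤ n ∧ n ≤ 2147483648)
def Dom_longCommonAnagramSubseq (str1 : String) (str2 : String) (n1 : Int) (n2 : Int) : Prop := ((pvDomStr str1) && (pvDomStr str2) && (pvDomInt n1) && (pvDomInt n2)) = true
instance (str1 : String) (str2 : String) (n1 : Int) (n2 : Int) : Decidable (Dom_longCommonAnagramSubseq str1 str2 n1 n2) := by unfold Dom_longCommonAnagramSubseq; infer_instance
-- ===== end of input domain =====

-- B replaces A's second frequency array and 26-slot minimum-summing loop by one greedy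
-- matching pass over str2's prefix (alternative decomposition; same asymptotic cost).


-- ===== PORT A =====
-- one iteration of A's counting loops: freq[ord(s[i]) - ord('a')] += 1
def pvCountStep (s : List Char) (f : List Int) (i : Int) : List Int :=
  let idx : Int := ((PySem.List.pyGetD s i ' ').toNat : Int) - 97
  PySem.List.pySetD f idx (PySem.List.pyGetD f idx 0 + 1)

def longCommonAnagramSubseq (str1 : String) (str2 : String) (n1 : Int) (n2 : Int) : Int :=
  let freq1 := (PySem.List.pyRange 0 n1 1).foldl (pvCountStep str1.toList) (List.replicate 26 0)
  let freq2 := (PySem.List.pyRange 0 n2 1).foldl (pvCountStep str2.toList) (List.replicate 26 0)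
  (PySem.List.pyRange 0 26 1).foldl
    (fun l i => l + min (PySem.List.pyGetD freq1 i 0) (PySem.List.pyGetD freq2 i 0)) 0

-- ===== PORT B =====
-- one iteration of B's greedy matching loop over str2
def pvMatchStep (s : List Char) (st : List Int × Int) (j : Int) : List Int × Int :=
  let idx : Int := ((PySem.List.pyGetD s j ' ').toNat : Int) - 97
  if PySem.List.pyGetD st.1 idx 0 > 0 then
    (PySem.List.pySetD st.1 idx (PySem.List.pyGetD st.1 idx 0 - 1), st.2 + 1)
  else st

def longCommonAnagramSubseq_alt (str1 : String) (str2 : String) (n1 : Int) (n2 : Int) : Int :=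
  let freq1 := (PySem.List.pyRange 0 n1 1).foldl
    (fun f i =>
      let idx : Int := ((PySem.List.pyGetD str1.toList i ' ').toNat : Int) - 97
      PySem.List.pySetD f idx (PySem.List.pyGetD f idx 0 + 1))
    (List.replicate 26 0)
  ((PySem.List.pyRange 0 n2 1).foldl (pvMatchStep str2.toList) (freq1, 0)).2

-- ===== PRECONDITION & SPEC =====
-- Pre_ excludes exactly the inputs where A raises IndexError: an n beyond the string's
-- length, or a scanned character whose ord(c)-ord('a') index falls outside Python's
-- valid range [-26,25] for the 26-slot list (i.e. a character code outside [71,122]).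
def Pre_longCommonAnagramSubseq (str1 : String) (str2 : String) (n1 : Int) (n2 : Int) : Prop :=
  n1 ≤ (str1.toList.length : Int) ∧ n2 ≤ (str2.toList.length : Int) ∧
  ((str1.toList.take n1.toNat).all fun c => 71 ≤ c.toNat && c.toNat ≤ 122) = true ∧
  ((str2.toList.take n2.toNat).all fun c => 71 ≤ c.toNat && c.toNat ≤ 122) = true
instance (str1 : String) (str2 : String) (n1 : Int) (n2 : Int) : Decidable (Pre_longCommonAnagramSubseq str1 str2 n1 n2) := by unfold Pre_longCommonAnagramSubseq; infer_instance

def pvWitness_longCommonAnagramSubseq : String × String × Int × Int := ("abca", "cab", 4, 3)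

def Spec_longCommonAnagramSubseq (str1 : String) (str2 : String) (n1 : Int) (n2 : Int) (out : Int) : Prop := out = longCommonAnagramSubseq_alt str1 str2 n1 n2
instance (str1 : String) (str2 : String) (n1 : Int) (n2 : Int) (out : Int) : Decidable (Spec_longCommonAnagramSubseq str1 str2 n1 n2 out) := by unfold Spec_longCommonAnagramSubseq; infer_instance

-- ===== CLAIM (what is proved, stated in full; the proofs are below) =====
def Claim_equal_longCommonAnagramSubseq : Prop := ∀ (str1 : String) (str2 : String) (n1 : Int) (n2 : Int), Dom_longCommonAnagramSubseq str1 str2 n1 n2 → Pre_longCommonAnagramSubseq str1 str2 n1 n2 → Spec_longCommonAnagramSubseq str1 str2 n1 n2 (longCommonAnagramSubseq str1 str2 n1 n2)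

-- ===== LEMMAS AND PROOFS =====

-- the effective (Python-wrapped) slot of a scanned character in the 26-slot list
def pvSlot (c : Char) : Nat := (c.toNat - 71) % 26

-- the frequency table holding the counts of slots occurring in t
def pvFreqOf (t : List Nat) : List Int := (List.range 26).map (fun k => (t.count k : Int))

theorem pvSlot_lt (c : Char) : pvSlot c < 26 := Nat.mod_lt _ (by norm_num)

theorem pvFreqOf_length (t : List Nat) : (pvFreqOf t).length = 26 := by simp [pvFreqOf]

theorem pvFreqOf_getD (t : List Nat) (k : Nat) (hk : k < 26) :
    (pvFreqOf t).getD k 0 = (t.count k : Int) := by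
  rw [List.getD_eq_getElem _ _ (by simpa [pvFreqOf] using hk)]
  simp [pvFreqOf]

theorem pvFreqOf_nil : List.replicate 26 (0:Int) = pvFreqOf [] := by decide

theorem pvFreqOf_nonneg (t : List Nat) (k : Nat) : 0 ≤ (pvFreqOf t).getD k 0 := by
  by_cases hk : k < 26
  · rw [pvFreqOf_getD t k hk]; positivity
  · rw [List.getD_eq_default _ _ (by simp [pvFreqOf]; omega)]

-- Python's wrapped indexing at ord(c)-97 normalizes to plain indexing at the slot
theorem pvGetD_slot (f : List Int) (c : Char) (d : Int) (hf : f.length = 26)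
    (h1 : 71 ≤ c.toNat) (h2 : c.toNat ≤ 122) :
    PySem.List.pyGetD f (((c.toNat : Int)) - 97) d = f.getD (pvSlot c) d := by
  by_cases h : 97 ≤ c.toNat
  · have h0 : (0:Int) ≤ (c.toNat : Int) - 97 := by omega
    have hlt : (c.toNat : Int) - 97 < (f.length : Int) := by omega
    rw [PySem.List.pyGetD_eq_getElem f d h0 hlt]
    rw [List.getD_eq_getElem _ _ (by have := pvSlot_lt c; omega : pvSlot c < f.length)]
    congr 1
    simp [pvSlot]
    omega
  · have hk : (c.toNat : Int) - 97 = -(((97 - c.toNat : Nat) : Int)) := by omega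
    rw [hk, PySem.List.pyGetD_neg_natCast f _ d (by omega) (by omega)]
    rw [List.getD_eq_getElem _ _ (by have := pvSlot_lt c; omega : pvSlot c < f.length)]
    congr 1
    simp [pvSlot]
    omega

theorem pvSetD_slot (f : List Int) (c : Char) (v : Int) (hf : f.length = 26)
    (h1 : 71 ≤ c.toNat) (h2 : c.toNat ≤ 122) :
    PySem.List.pySetD f (((c.toNat : Int)) - 97) v = f.set (pvSlot c) v := by
  unfold PySem.List.pySetD PySem.List.pySet? PySem.List.pyIdx?
  by_cases h : 97 ≤ c.toNat
  · rw [if_pos (by omega : (0:Int) ≤ (c.toNat : Int) - 97), if_pos (by omega : (c.toNat : Int) - 97 < (f.length:Int))]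
    simp only [Option.map_some, Option.getD_some]
    congr 1
    simp [pvSlot]
    omega
  · rw [if_neg (by omega : ¬ (0:Int) ≤ (c.toNat : Int) - 97), if_pos (by omega : -((f.length:Int)) ≤ (c.toNat : Int) - 97)]
    simp only [Option.map_some, Option.getD_some]
    congr 1
    simp [pvSlot]
    omega

theorem pvGetD_set_self (f : List Int) (e : Nat) (v : Int) (he : e < f.length) :
    (f.set e v).getD e 0 = v := by
  rw [List.getD_eq_getElem _ _ (by simpa using he)]
  simp

theorem pvGetD_set_ne (f : List Int) (e k : Nat) (v : Int) (h : k ≠ e) :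
    (f.set e v).getD k 0 = f.getD k 0 := by
  by_cases hk : k < f.length
  · rw [List.getD_eq_getElem _ _ (by simpa using hk), List.getD_eq_getElem _ _ hk]
    simp [List.getElem_set]
    intro h'
    exact absurd h'.symm h
  · rw [List.getD_eq_default _ _ (by simpa using hk), List.getD_eq_default _ _ (by omega)]

-- a range-indexed fold over a list's prefix is a fold over the prefix itself
theorem pvFoldl_range_getD {β : Type} (s : List Char) (g : β → Char → β) (d : Char)
    (m : Nat) (hm : m ≤ s.length) (init : β) :
    (List.range m).foldl (fun st k => g st (s.getD k d)) init = (s.take m).foldl g init := by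
  induction m with
  | zero => simp
  | succ m ih =>
    rw [List.range_succ, List.foldl_append, ih (by omega)]
    rw [List.take_add_one, List.foldl_append]
    simp [List.getElem?_eq_getElem (by omega : m < s.length)]

theorem pvFoldl_pyRange_getD {β : Type} (s : List Char) (g : β → Char → β) (n : Int)
    (hn : n ≤ (s.length : Int)) (init : β) :
    (PySem.List.pyRange 0 n 1).foldl (fun st i => g st (PySem.List.pyGetD s i ' ')) init
      = (s.take n.toNat).foldl g init := by
  rw [PySem.List.pyRange_one, sub_zero, List.foldl_map]
  have : ∀ st (k : Nat), g st (PySem.List.pyGetD s ((0:Int) + k) ' ') = g st (s.getD k ' ') := by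
    intro st k
    rw [zero_add, PySem.List.pyGetD_natCast]
  simp only [this]
  rw [pvFoldl_range_getD s g ' ' n.toNat (by omega) init]

-- one increment extends the frequency table by one occurrence
theorem pvFreqOf_incr (acc : List Nat) (e : Nat) (he : e < 26) :
    (pvFreqOf acc).set e ((pvFreqOf acc).getD e 0 + 1) = pvFreqOf (acc ++ [e]) := by
  apply List.ext_getElem
  · simp [pvFreqOf]
  · intro j hj hj2
    have hj26 : j < 26 := by simpa [pvFreqOf] using hj2
    rw [List.getElem_set]
    by_cases hje : j = e
    · subst hje
      rw [if_pos rfl, pvFreqOf_getD _ _ hj26]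
      simp [pvFreqOf, List.getElem_map, List.count_append]
    · rw [if_neg (by omega)]
      simp [pvFreqOf, List.count_append, List.count_singleton]
      intro h; omega

-- A's counting loop builds exactly the frequency table of the slots
theorem pvCount_fold (p : List Char) (acc : List Nat)
    (hp : ∀ c ∈ p, 71 ≤ c.toNat ∧ c.toNat ≤ 122) :
    p.foldl (fun f c =>
        PySem.List.pySetD f (((c.toNat : Int)) - 97)
          (PySem.List.pyGetD f (((c.toNat : Int)) - 97) 0 + 1)) (pvFreqOf acc)
      = pvFreqOf (acc ++ p.map pvSlot) := by
  induction p generalizing acc with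
  | nil => simp
  | cons c p ih =>
    obtain ⟨h1, h2⟩ := hp c (List.mem_cons_self ..)
    rw [List.foldl_cons,
      pvGetD_slot _ _ _ (pvFreqOf_length acc) h1 h2,
      pvSetD_slot _ _ _ (pvFreqOf_length acc) h1 h2,
      pvFreqOf_incr acc (pvSlot c) (pvSlot_lt c),
      ih _ (fun x hx => hp x (List.mem_cons_of_mem _ hx))]
    simp

theorem pvSum_indicator (e : Nat) (he : e < 26) :
    ((List.range 26).map (fun k => if k = e then (1 : Int) else 0)).sum = 1 := by
  have h : ∀ k, (if k = e then (1:Int) else 0) = if (k == e) = true then (1:Int) else 0 := by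
    intro k; simp
  simp only [h]
  rw [PySem.List.sum_map_ite_one_zero (fun k => k == e) (List.range 26)]
  have : (List.range 26).countP (fun k => k == e) = (List.range 26).count e := by
    simp [List.count]
  rw [this, List.count_eq_one_of_mem List.nodup_range (by simpa using he)]
  simp

-- greedy invariant: the matched count is the sum of per-slot minima
theorem pvGreedy_fold (p : List Char) (f : List Int) (l : Int)
    (hp : ∀ c ∈ p, 71 ≤ c.toNat ∧ c.toNat ≤ 122)
    (hf : f.length = 26) (hnn : ∀ k, 0 ≤ f.getD k 0) :
    (p.foldl (fun st c =>
        if PySem.List.pyGetD st.1 (((c.toNat : Int)) - 97) 0 > 0 then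
          (PySem.List.pySetD st.1 (((c.toNat : Int)) - 97)
            (PySem.List.pyGetD st.1 (((c.toNat : Int)) - 97) 0 - 1), st.2 + 1)
        else st) (f, l)).2
      = l + ((List.range 26).map
          (fun k => min (f.getD k 0) (((p.map pvSlot).count k : Nat) : Int))).sum := by
  induction p generalizing f l with
  | nil =>
    have : ∀ k ∈ List.range 26, min (f.getD k 0) ((((List.map pvSlot []).count k : Nat)) : Int) = 0 := by
      intro k _
      have := hnn k
      simp only [List.map_nil, List.count_nil, Nat.cast_zero]
      omega
    rw [List.foldl_nil, List.map_congr_left this]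
    simp
  | cons c p ih =>
    obtain ⟨h1, h2⟩ := hp c (List.mem_cons_self ..)
    set e := pvSlot c with hedef
    have he : e < 26 := pvSlot_lt c
    rw [List.foldl_cons]
    simp only [pvGetD_slot f c 0 hf h1 h2, pvSetD_slot f c _ hf h1 h2]
    by_cases hpos : f.getD e 0 > 0
    · rw [if_pos hpos]
      rw [ih (f.set e (f.getD e 0 - 1)) (l + 1)
        (fun x hx => hp x (List.mem_cons_of_mem _ hx))
        (by simpa using hf)
        (by
          intro k
          by_cases hk : k = e
          · rw [hk, pvGetD_set_self f e _ (by omega)]; omega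
          · rw [pvGetD_set_ne f e k _ hk]; exact hnn k)]
      have key : ∀ k ∈ List.range 26,
          min (f.getD k 0) ((((List.map pvSlot (c :: p)).count k : Nat)) : Int)
            = min ((f.set e (f.getD e 0 - 1)).getD k 0) ((((List.map pvSlot p).count k : Nat)) : Int)
              + (if k = e then (1:Int) else 0) := by
        intro k _
        by_cases hk : k = e
        · rw [hk, pvGetD_set_self f e _ (by omega), if_pos rfl]
          simp [List.count_cons]
          omega
        · rw [pvGetD_set_ne f e k _ hk, if_neg hk]
          have : (List.map pvSlot (c :: p)).count k = (List.map pvSlot p).count k := by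
            simp [List.count_cons]
            omega
          rw [this]
          simp
      rw [List.map_congr_left key, PySem.List.sum_map_add_int, pvSum_indicator e he]
      ring
    · rw [if_neg hpos]
      rw [ih f l (fun x hx => hp x (List.mem_cons_of_mem _ hx)) hf hnn]
      have key : ∀ k ∈ List.range 26,
          min (f.getD k 0) ((((List.map pvSlot p).count k : Nat)) : Int)
            = min (f.getD k 0) ((((List.map pvSlot (c :: p)).count k : Nat)) : Int) := by
        intro k _
        by_cases hk : k = e
        · have h0 : f.getD e 0 = 0 := le_antisymm (by omega) (hnn e)
          rw [hk, h0]
          simp [List.count_cons]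
          rw [if_pos hedef.symm]
          positivity
        · have : (List.map pvSlot (c :: p)).count k = (List.map pvSlot p).count k := by
            simp [List.count_cons]; omega
          rw [this]
      rw [List.map_congr_left key]

-- A's counting loop, from range-fold to frequency table
theorem pvCountLoop (s : List Char) (n : Int) (hn : n ≤ (s.length : Int))
    (hok : ∀ c ∈ s.take n.toNat, 71 ≤ c.toNat ∧ c.toNat ≤ 122) :
    (PySem.List.pyRange 0 n 1).foldl (pvCountStep s) (List.replicate 26 0)
      = pvFreqOf ((s.take n.toNat).map pvSlot) := by
  have hshape : pvCountStep s = fun (f : List Int) (i : Int) =>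
      (fun (f : List Int) (c : Char) =>
        PySem.List.pySetD f (((c.toNat : Int)) - 97)
          (PySem.List.pyGetD f (((c.toNat : Int)) - 97) 0 + 1)) f (PySem.List.pyGetD s i ' ') := rfl
  rw [hshape, pvFreqOf_nil,
    pvFoldl_pyRange_getD s (fun (f : List Int) (c : Char) =>
      PySem.List.pySetD f (((c.toNat : Int)) - 97)
        (PySem.List.pyGetD f (((c.toNat : Int)) - 97) 0 + 1)) n hn (pvFreqOf []),
    pvCount_fold _ [] hok, List.nil_append]

theorem pvEq (str1 str2 : String) (n1 n2 : Int)
    (h1 : n1 ≤ (str1.toList.length : Int)) (h2 : n2 ≤ (str2.toList.length : Int))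
    (hok1 : ∀ c ∈ str1.toList.take n1.toNat, 71 ≤ c.toNat ∧ c.toNat ≤ 122)
    (hok2 : ∀ c ∈ str2.toList.take n2.toNat, 71 ≤ c.toNat ∧ c.toNat ≤ 122) :
    longCommonAnagramSubseq str1 str2 n1 n2 = longCommonAnagramSubseq_alt str1 str2 n1 n2 := by
  unfold longCommonAnagramSubseq longCommonAnagramSubseq_alt
  simp only
  set m1 := (str1.toList.take n1.toNat).map pvSlot with hm1
  set m2 := (str2.toList.take n2.toNat).map pvSlot with hm2
  have hc1 : (PySem.List.pyRange 0 n1 1).foldl (pvCountStep str1.toList) (List.replicate 26 0)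
      = pvFreqOf m1 := pvCountLoop str1.toList n1 h1 hok1
  have hc1' : (PySem.List.pyRange 0 n1 1).foldl
      (fun (f : List Int) (i : Int) =>
        let idx : Int := ((PySem.List.pyGetD str1.toList i ' ').toNat : Int) - 97
        PySem.List.pySetD f idx (PySem.List.pyGetD f idx 0 + 1))
      (List.replicate 26 0) = pvFreqOf m1 := hc1
  have hc2 : (PySem.List.pyRange 0 n2 1).foldl (pvCountStep str2.toList) (List.replicate 26 0)
      = pvFreqOf m2 := pvCountLoop str2.toList n2 h2 hok2
  rw [hc1, hc1', hc2]
  -- B side: the greedy pass yields the sum of per-slot minima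
  have hmatch : pvMatchStep str2.toList = fun (st : List Int × Int) (j : Int) =>
      (fun (st : List Int × Int) (c : Char) =>
        if PySem.List.pyGetD st.1 (((c.toNat : Int)) - 97) 0 > 0 then
          (PySem.List.pySetD st.1 (((c.toNat : Int)) - 97)
            (PySem.List.pyGetD st.1 (((c.toNat : Int)) - 97) 0 - 1), st.2 + 1)
        else st) st (PySem.List.pyGetD str2.toList j ' ') := rfl
  rw [hmatch, pvFoldl_pyRange_getD str2.toList (fun (st : List Int × Int) (c : Char) =>
        if PySem.List.pyGetD st.1 (((c.toNat : Int)) - 97) 0 > 0 then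
          (PySem.List.pySetD st.1 (((c.toNat : Int)) - 97)
            (PySem.List.pyGetD st.1 (((c.toNat : Int)) - 97) 0 - 1), st.2 + 1)
        else st) n2 h2 (pvFreqOf m1, 0),
    pvGreedy_fold _ _ 0 hok2 (by simp [pvFreqOf]) (pvFreqOf_nonneg m1)]
  -- A side: the min-summing loop is the same sum
  rw [PySem.List.pyRange_one, sub_zero, List.foldl_map]
  have hsh : ∀ (l : Int) (k : Nat),
      l + min (PySem.List.pyGetD (pvFreqOf m1) ((0:Int) + k) 0)
              (PySem.List.pyGetD (pvFreqOf m2) ((0:Int) + k) 0)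
        = l + (fun k => min ((pvFreqOf m1).getD k 0) ((pvFreqOf m2).getD k 0)) k := by
    intro l k
    rw [zero_add, PySem.List.pyGetD_natCast, PySem.List.pyGetD_natCast]
  simp only [hsh]
  rw [PySem.List.foldl_add]
  have h26 : (26:Int).toNat = 26 := by decide
  rw [h26]
  congr 1

-- ===== VERDICT (by name: the statement is the Claim_ definition above) =====
theorem longCommonAnagramSubseq_spec : Claim_equal_longCommonAnagramSubseq := by
  intro str1 str2 n1 n2 _ hpre
  unfold Spec_longCommonAnagramSubseq
  obtain ⟨h1, h2, hok1, hok2⟩ := hpre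
  refine pvEq str1 str2 n1 n2 h1 h2 ?_ ?_
  · intro c hc
    have := List.all_eq_true.mp hok1 c hc
    simp only [Bool.and_eq_true, decide_eq_true_eq] at this
    exact this
  · intro c hc
    have := List.all_eq_true.mp hok2 c hc
    simp only [Bool.and_eq_true, decide_eq_true_eq] at this
    exact this
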